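-- pv_equiv track=rewrite | github.com/k5ta/Routes | src/littles_algorithm.py | calculate_coefficients
-- ===== SOURCE A (Python) =====
-- def calculate_coefficients(matrix, zeros):
--     coefficients = []
--     for zero in zeros:
--         first_min = second_min = float("Inf")
--         for i in range(len(matrix[zero[0]])):
--             if i != zero[1] and matrix[zero[0]][i] < first_min:
--                 first_min = matrix[zero[0]][i]
--         for i in range(len(matrix)):
--             if i != zero[0] and matrix[i][zero[1]] < second_min:
--                 second_min = matrix[i][zero[1]]
--         if first_min == float("Inf"):
--             first_min = 0
--         if second_min == float("Inf"):
--             second_min = 0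
--         coefficients.append((first_min + second_min, zero))
--     return coefficients
-- ===== SOURCE B (Python) =====
-- def calculate_coefficients(matrix, zeros):
--     INF = float("Inf")
--
--     def two_smallest(values):
--         m1 = m2 = INF
--         i1 = -1
--         for i, v in enumerate(values):
--             if v < m1:
--                 m1, i1, m2 = v, i, m1
--             elif v < m2:
--                 m2 = v
--         return m1, i1, m2
--
--     rows = [two_smallest(row) for row in matrix]
--     width = min((len(row) for row in matrix), default=0)
--     cols = [two_smallest(row[c] for row in matrix) for c in range(width)]
--
--     def coeff(r, c):
--         m1, i1, m2 = rows[r]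
--         row_min = m2 if i1 == c else m1
--         n1, j1, n2 = cols[c]
--         col_min = n2 if j1 == r else n1
--         return ((row_min if row_min != INF else 0)
--                 + (col_min if col_min != INF else 0))
--
--     return [(coeff(r, c), (r, c)) for r, c in zeros]
-- ===== Notes on version B (the rewrite author's own statement) =====
-- stated objective: alternative
-- what changed: Instead of rescanning the zero's whole row and column for every zero, B precomputes a two-smallest-values table (value, first-min index, second value) for every row and every column once and answers each zero by table lookup; measured cost is the same on the generated inputs.
-- outside the precondition, e.g. on calculate_coefficients([[1, 2, 9], [3, 4]], [(1, -1)]): A returns [(12, (1, -1))], B returns [(5, (1, -1))]; on calculate_coefficients([[5, 7]], [(0, 5)]): A returns [(5, (0, 5))], B raises IndexError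
import Mathlib
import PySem

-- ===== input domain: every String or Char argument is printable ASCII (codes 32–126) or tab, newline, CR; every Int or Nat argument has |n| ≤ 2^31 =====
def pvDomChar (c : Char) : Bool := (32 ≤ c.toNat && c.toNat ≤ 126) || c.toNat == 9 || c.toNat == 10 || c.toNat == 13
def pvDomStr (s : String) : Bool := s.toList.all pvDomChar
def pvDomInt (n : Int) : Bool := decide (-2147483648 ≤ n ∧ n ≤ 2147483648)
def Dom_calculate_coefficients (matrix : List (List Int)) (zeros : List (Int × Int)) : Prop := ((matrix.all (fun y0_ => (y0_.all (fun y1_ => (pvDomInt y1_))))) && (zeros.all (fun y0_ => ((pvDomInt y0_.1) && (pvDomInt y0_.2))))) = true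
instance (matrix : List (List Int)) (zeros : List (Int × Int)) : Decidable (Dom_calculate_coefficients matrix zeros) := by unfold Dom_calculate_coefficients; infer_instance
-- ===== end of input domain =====

-- Alternative algorithm: B precomputes a two-smallest table (value, first-min index, second value)
-- for every row and column once and answers each zero by table lookup, instead of A's per-zero rescans.

-- Python's 'v < m' where m may be the float('Inf') sentinel (encoded as none); shared comparator of both ports.
def pvOptLt (v : Int) (m : Option Int) : Bool :=
  match m with
  | none => true
  | some a => decide (v < a)

-- ===== PORT A =====
def calculate_coefficients (matrix : List (List Int)) (zeros : List (Int × Int)) : List (Int × (Int × Int)) :=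
  zeros.foldl (fun coefficients zero =>
    let row := PySem.List.pyGetD matrix zero.1 []
    let first_min := (PySem.List.pyRange 0 (PySem.List.len row) 1).foldl
      (fun fm i =>
        if i ≠ zero.2 ∧ pvOptLt (PySem.List.pyGetD row i 0) fm = true
        then some (PySem.List.pyGetD row i 0) else fm)
      (none : Option Int)
    let second_min := (PySem.List.pyRange 0 (PySem.List.len matrix) 1).foldl
      (fun sm i =>
        if i ≠ zero.1 ∧ pvOptLt (PySem.List.pyGetD (PySem.List.pyGetD matrix i []) zero.2 0) sm = true
        then some (PySem.List.pyGetD (PySem.List.pyGetD matrix i []) zero.2 0) else sm)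
      (none : Option Int)
    let fm : Int := match first_min with | none => 0 | some v => v
    let sm : Int := match second_min with | none => 0 | some v => v
    coefficients ++ [(fm + sm, zero)]) []

-- ===== PORT B =====
-- two_smallest of Source B: (m1, i1, m2) = smallest value, index of its first occurrence, second smallest; none = Inf.
def pvTwoSmallest (values : List Int) : Option Int × Int × Option Int :=
  (PySem.List.enumerate values 0).foldl
    (fun st p =>
      if pvOptLt p.2 st.1 = true then (some p.2, p.1, st.1)
      else if pvOptLt p.2 st.2.2 = true then (st.1, st.2.1, some p.2)
      else st)
    (none, -1, none)

def calculate_coefficients_alt (matrix : List (List Int)) (zeros : List (Int × Int)) : List (Int × (Int × Int)) :=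
  let rows := matrix.map (fun row => pvTwoSmallest row)
  let width := PySem.List.minD (matrix.map (fun row => PySem.List.len row)) id 0
  let cols := (PySem.List.pyRange 0 width 1).map
    (fun c => pvTwoSmallest (matrix.map (fun row => PySem.List.pyGetD row c 0)))
  zeros.map (fun zero =>
    let rst := PySem.List.pyGetD rows zero.1 (none, -1, none)
    let row_min := if rst.2.1 = zero.2 then rst.2.2 else rst.1
    let cst := PySem.List.pyGetD cols zero.2 (none, -1, none)
    let col_min := if cst.2.1 = zero.1 then cst.2.2 else cst.1
    ((match row_min with | none => (0 : Int) | some v => v) +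
     (match col_min with | none => (0 : Int) | some v => v), zero))

-- ===== PRECONDITION & SPEC =====
-- Pre_ keeps the inputs on which A indexes safely: every zero's row index is in range and its column
-- index is in range in EVERY row, with rectangularity required for negative column indices.
-- It excludes (i) out-of-range coordinates (A raises IndexError, except degenerate corners where only
-- the zero's own too-short row is indexed and A still returns while B raises) and (ii) negative column
-- indices on ragged matrices, where A's per-row Python wraparound reads a different physical column in
-- every row — an artefact of A's indexing that no single column answer can reproduce.
def Pre_calculate_coefficients (matrix : List (List Int)) (zeros : List (Int × Int)) : Prop :=
  ∀ z ∈ zeros, PySem.Raise.InRange matrix.length z.1 ∧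
    (∀ row ∈ matrix, PySem.Raise.InRange row.length z.2) ∧
    (0 ≤ z.2 ∨ ∀ row ∈ matrix, row.length = (matrix.headD []).length)
instance (matrix : List (List Int)) (zeros : List (Int × Int)) : Decidable (Pre_calculate_coefficients matrix zeros) := by unfold Pre_calculate_coefficients; infer_instance

def pvWitness_calculate_coefficients : List (List Int) × (List (Int × Int)) :=
  ([[0, 2], [3, 0]], [(0, 0), (1, 1)])

def Spec_calculate_coefficients (matrix : List (List Int)) (zeros : List (Int × Int)) (out : List (Int × (Int × Int))) : Prop := out = calculate_coefficients_alt matrix zeros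
instance (matrix : List (List Int)) (zeros : List (Int × Int)) (out : List (Int × (Int × Int))) : Decidable (Spec_calculate_coefficients matrix zeros out) := by unfold Spec_calculate_coefficients; infer_instance

-- ===== CLAIM (what is proved, stated in full; the proofs are below) =====
def Claim_equal_calculate_coefficients : Prop := ∀ (matrix : List (List Int)) (zeros : List (Int × Int)), Dom_calculate_coefficients matrix zeros → Pre_calculate_coefficients matrix zeros → Spec_calculate_coefficients matrix zeros (calculate_coefficients matrix zeros)

-- ===== LEMMAS AND PROOFS =====

-- A's accumulator step (exclude index c, keep the smaller value) over an enumerated list.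
def pvStepA (c : Int) (acc : Option Int) (p : Int × Int) : Option Int :=
  if p.1 ≠ c ∧ pvOptLt p.2 acc = true then some p.2 else acc

-- B's two-smallest step over an enumerated list.
def pvStepB (st : Option Int × Int × Option Int) (p : Int × Int) : Option Int × Int × Option Int :=
  if pvOptLt p.2 st.1 = true then (some p.2, p.1, st.1)
  else if pvOptLt p.2 st.2.2 = true then (st.1, st.2.1, some p.2)
  else st

-- extended-integer order with none = +Inf
def pvOle (a b : Option Int) : Prop :=
  match a, b with
  | _, none => True
  | none, some _ => False
  | some x, some y => x ≤ y

lemma pv_step (k c i1 : Int) (m1 m2 : Option Int) (x : Int)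
    (h1 : i1 < k) (h2 : pvOle m1 m2) :
    pvStepA c (if i1 = c then m2 else m1) (k, x) =
      (if (pvStepB (m1, i1, m2) (k, x)).2.1 = c then (pvStepB (m1, i1, m2) (k, x)).2.2
       else (pvStepB (m1, i1, m2) (k, x)).1) ∧
    pvOle (pvStepB (m1, i1, m2) (k, x)).1 (pvStepB (m1, i1, m2) (k, x)).2.2 ∧
    (pvStepB (m1, i1, m2) (k, x)).2.1 < k + 1 := by
  rcases m1 with _ | a <;> rcases m2 with _ | b <;>
    simp only [pvStepA, pvStepB, pvOptLt, pvOle] at h2 ⊢ <;>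
    by_cases hkc : k = c <;> by_cases hic : i1 = c <;>
    split_ifs <;> simp_all <;> omega

lemma pv_main (xs : List Int) : ∀ (k c i1 : Int) (m1 m2 acc : Option Int),
    i1 < k → pvOle m1 m2 → acc = (if i1 = c then m2 else m1) →
    (PySem.List.enumerate xs k).foldl (pvStepA c) acc =
      (if ((PySem.List.enumerate xs k).foldl pvStepB (m1, i1, m2)).2.1 = c
       then ((PySem.List.enumerate xs k).foldl pvStepB (m1, i1, m2)).2.2
       else ((PySem.List.enumerate xs k).foldl pvStepB (m1, i1, m2)).1) ∧
    pvOle ((PySem.List.enumerate xs k).foldl pvStepB (m1, i1, m2)).1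
          ((PySem.List.enumerate xs k).foldl pvStepB (m1, i1, m2)).2.2 ∧
    ((PySem.List.enumerate xs k).foldl pvStepB (m1, i1, m2)).2.1 < k + xs.length := by
  induction xs with
  | nil =>
    intro k c i1 m1 m2 acc h1 h2 h3
    simp only [PySem.List.enumerate_nil, List.foldl_nil, List.length_nil]
    exact ⟨h3, h2, by omega⟩
  | cons x t ih =>
    intro k c i1 m1 m2 acc h1 h2 h3
    rw [PySem.List.enumerate_cons]
    simp only [List.foldl_cons]
    subst h3
    obtain ⟨k1, k2, k3⟩ := pv_step k c i1 m1 m2 x h1 h2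
    rcases hst : pvStepB (m1, i1, m2) (k, x) with ⟨n1, j1, n2⟩
    rw [hst] at k1 k2 k3
    obtain ⟨r1, r2, r3⟩ := ih (k+1) c j1 n1 n2 _ k3 k2 k1
    refine ⟨r1, r2, ?_⟩
    simp only [List.length_cons] at *
    push_cast at r3 ⊢
    omega

lemma pv_bridgeA (xs : List Int) (c : Int) (acc : Option Int) :
    (PySem.List.pyRange 0 (PySem.List.len xs) 1).foldl
      (fun fm i =>
        if i ≠ c ∧ pvOptLt (PySem.List.pyGetD xs i 0) fm = true
        then some (PySem.List.pyGetD xs i 0) else fm) acc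
    = (PySem.List.enumerate xs 0).foldl (pvStepA c) acc := by
  have h : PySem.List.pyRange 0 (PySem.List.len xs) 1 = (PySem.List.enumerate xs 0).map (·.1) := by
    rw [PySem.List.map_fst_enumerate, PySem.List.len_eq]
    norm_num
  rw [h, List.foldl_map]
  apply PySem.List.foldl_congr_mem
  intro a p hp
  rw [PySem.List.mem_enumerate_iff] at hp
  obtain ⟨j, hj, rfl⟩ := hp
  simp only [pvStepA, zero_add]
  rw [PySem.List.pyGetD_natCast]
  rw [List.getD_eq_getElem _ _ hj]

lemma pv_min?_id_some (x : Int) (t : List Int) : ∃ m, PySem.List.min? (x :: t) id = some m := by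
  suffices h : ∀ (l : List Int) (s : Int), ∃ m,
      l.foldl (fun acc y =>
        match acc with
        | none => some y
        | some m => if id y < id m then some y else some m) (some s) = some m by
    have he : PySem.List.min? (x :: t) id =
        t.foldl (fun acc y =>
          match acc with
          | none => some y
          | some m => if id y < id m then some y else some m) (some x) := by
      unfold PySem.List.min?
      rw [List.foldl_cons]
      apply PySem.List.foldl_congr_mem
      intro a y _
      cases a <;> rfl
    rw [he]
    exact h t x
  intro l
  induction l with
  | nil => exact fun s => ⟨s, rfl⟩
  | cons y t ih =>
    intro s
    simp only [List.foldl_cons]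
    split <;> exact ih _

lemma pv_width (matrix : List (List Int)) (c : Int) (hm : matrix ≠ [])
    (h : ∀ row ∈ matrix, c < (row.length : Int)) :
    c < PySem.List.minD (matrix.map (fun row => PySem.List.len row)) id 0 := by
  rcases matrix with _ | ⟨r0, rest⟩
  · exact absurd rfl hm
  obtain ⟨m, hmin⟩ := pv_min?_id_some (PySem.List.len r0) (rest.map (fun row => PySem.List.len row))
  have hmin' : PySem.List.min? ((r0 :: rest).map (fun row => PySem.List.len row)) id = some m := by
    simpa using hmin
  have hmem := PySem.List.min?_mem hmin'
  rw [List.mem_map] at hmem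
  obtain ⟨row, hrow, hlen⟩ := hmem
  have : c < m := by
    rw [← hlen, PySem.List.len_eq]
    exact h row hrow
  unfold PySem.List.minD
  rw [hmin']
  simpa using this

lemma pvTwoSmallest_eq (xs : List Int) :
    pvTwoSmallest xs = (PySem.List.enumerate xs 0).foldl pvStepB (none, -1, none) := rfl

lemma pv_col (matrix : List (List Int)) (c r : Int)
    (acc : Option Int) :
    (PySem.List.pyRange 0 (PySem.List.len matrix) 1).foldl
      (fun sm i =>
        if i ≠ r ∧ pvOptLt (PySem.List.pyGetD (PySem.List.pyGetD matrix i []) c 0) sm = true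
        then some (PySem.List.pyGetD (PySem.List.pyGetD matrix i []) c 0) else sm) acc
    = (PySem.List.enumerate (matrix.map (fun row => PySem.List.pyGetD row c 0)) 0).foldl (pvStepA r) acc := by
  rw [← pv_bridgeA (matrix.map (fun row => PySem.List.pyGetD row c 0)) r acc]
  have hlen : PySem.List.len (matrix.map (fun row => PySem.List.pyGetD row c 0)) = PySem.List.len matrix := by
    simp [PySem.List.len]
  rw [hlen]
  apply PySem.List.foldl_congr_mem
  intro a i hi
  rw [PySem.List.mem_pyRange_one, PySem.List.len_eq] at hi
  have e1 : PySem.List.pyGetD matrix i [] = matrix[i.toNat]'(by omega) :=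
    PySem.List.pyGetD_eq_getElem matrix [] hi.1 hi.2
  have e2 : PySem.List.pyGetD (matrix.map (fun row => PySem.List.pyGetD row c 0)) i 0 =
      PySem.List.pyGetD (matrix[i.toNat]'(by omega)) c 0 := by
    rw [PySem.List.pyGetD_eq_getElem _ _ hi.1 (by simpa using hi.2)]
    simp
  rw [e1, e2]

-- B's precomputed-table lookups under Pre_ (the default tuple is pvTwoSmallest []).
lemma pv_rows_lookup (matrix : List (List Int)) (r : Int) :
    PySem.List.pyGetD (matrix.map (fun row => pvTwoSmallest row)) r (none, -1, none) =
      pvTwoSmallest (PySem.List.pyGetD matrix r []) :=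
  PySem.List.pyGetD_map (fun row => pvTwoSmallest row) matrix r []

lemma pv_width_rect (matrix : List (List Int)) (hm : matrix ≠ [])
    (hrect : ∀ row ∈ matrix, row.length = (matrix.headD []).length) :
    PySem.List.minD (matrix.map (fun row => PySem.List.len row)) id 0 =
      ((matrix.headD []).length : Int) := by
  rcases matrix with _ | ⟨r0, rest⟩
  · exact absurd rfl hm
  obtain ⟨m, hmin⟩ := pv_min?_id_some (PySem.List.len r0) (rest.map (fun row => PySem.List.len row))
  have hmin' : PySem.List.min? ((r0 :: rest).map (fun row => PySem.List.len row)) id = some m := by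
    simpa using hmin
  have hmem := PySem.List.min?_mem hmin'
  rw [List.mem_map] at hmem
  obtain ⟨row, hrow, hlen⟩ := hmem
  unfold PySem.List.minD
  rw [hmin']
  rw [← hlen, PySem.List.len_eq]
  simpa using hrect row hrow

lemma pv_cols_lookup (matrix : List (List Int)) (c : Int) (hm : matrix ≠ [])
    (hin : ∀ row ∈ matrix, PySem.Raise.InRange row.length c)
    (hrect : 0 ≤ c ∨ ∀ row ∈ matrix, row.length = (matrix.headD []).length) :
    PySem.List.pyGetD
      ((PySem.List.pyRange 0 (PySem.List.minD (matrix.map (fun row => PySem.List.len row)) id 0) 1).map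
        (fun c' => pvTwoSmallest (matrix.map (fun row => PySem.List.pyGetD row c' 0)))) c (none, -1, none)
    = pvTwoSmallest (matrix.map (fun row => PySem.List.pyGetD row c 0)) := by
  rcases lt_or_ge c 0 with hc | hc
  · have hrect' : ∀ row ∈ matrix, row.length = (matrix.headD []).length :=
      hrect.resolve_left (by omega)
    have hW : PySem.List.minD (matrix.map (fun row => PySem.List.len row)) id 0 =
        ((matrix.headD []).length : Int) := pv_width_rect matrix hm hrect'
    set L := (matrix.headD []).length with hL
    have hhead : matrix.headD [] ∈ matrix := by
      rcases matrix with _ | ⟨r0, rest⟩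
      · exact absurd rfl hm
      · simp
    have hLc : -(L : Int) ≤ c := by
      have := (hin _ hhead).1
      omega
    have hL0 : 0 < L := by omega
    have hk : c = -(((-c).toNat : Nat) : Int) := by omega
    rw [hW, hk]
    have hlen : ((PySem.List.pyRange 0 ((L : Int)) 1).map
        (fun c' => pvTwoSmallest (matrix.map (fun row => PySem.List.pyGetD row c' 0)))).length = L := by
      simp [PySem.List.length_pyRange_one]
    rw [PySem.List.pyGetD_neg_natCast _ _ _ (by omega) (by omega)]
    have h? := PySem.List.getElem?_map_pyRange_zero
      (fun c' => pvTwoSmallest (matrix.map (fun row => PySem.List.pyGetD row c' 0))) L (L - (-c).toNat)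
      (by omega)
    rw [List.getElem?_eq_getElem (by omega)] at h?
    simp only [hlen]
    rw [Option.some.injEq] at h?
    rw [h?]
    refine congrArg pvTwoSmallest (List.map_congr_left ?_)
    intro row hrow
    have hrl : row.length = L := hrect' row hrow
    have e1 : PySem.List.pyGetD row (((L - (-c).toNat : Nat) : Int)) 0 = row[L - (-c).toNat]'(by omega) := by
      rw [PySem.List.pyGetD_natCast]
      exact List.getD_eq_getElem _ _ (by omega)
    have e2 : PySem.List.pyGetD row (-(((-c).toNat : Nat) : Int)) 0 = row[row.length - (-c).toNat]'(by omega) :=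
      PySem.List.pyGetD_neg_natCast row (-c).toNat 0 (by omega) (by omega)
    rw [e1, e2]
    congr 1
    omega
  · have hW : c < PySem.List.minD (matrix.map (fun row => PySem.List.len row)) id 0 :=
      pv_width matrix c hm (fun row hrow => ((hin row hrow).2))
    rw [PySem.List.pyGetD_map_pyRange_of_nonneg _ _ _ _ hc hW]

theorem calculate_coefficients_spec : Claim_equal_calculate_coefficients := by
  intro matrix zeros _ hpre
  unfold Spec_calculate_coefficients calculate_coefficients calculate_coefficients_alt
  rw [PySem.List.foldl_append_singleton_eq_map]
  simp only [List.nil_append]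
  apply List.map_congr_left
  intro z hz
  obtain ⟨hrIn, hcIn, hrect⟩ := hpre z hz
  have hmne : matrix ≠ [] := by
    intro h
    rw [h] at hrIn
    obtain ⟨h1, h2⟩ := hrIn
    simp at h1 h2
    omega
  rw [pv_rows_lookup matrix z.1,
      pv_cols_lookup matrix z.2 hmne hcIn hrect,
      pv_bridgeA (PySem.List.pyGetD matrix z.1 []) z.2 none,
      pv_col matrix z.2 z.1 none]
  obtain ⟨a1, -, -⟩ := pv_main (PySem.List.pyGetD matrix z.1 []) 0 z.2 (-1) none none none
    (by omega) (by trivial) (by split <;> rfl)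
  obtain ⟨a2, -, -⟩ := pv_main (matrix.map (fun row => PySem.List.pyGetD row z.2 0)) 0 z.1 (-1) none none none
    (by omega) (by trivial) (by split <;> rfl)
  rw [a1, a2, ← pvTwoSmallest_eq, ← pvTwoSmallest_eq]
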